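-- pv_equiv track=rewrite | github.com/yersonargote/auto-simulation-invoper | fill.py | assigned_range
-- ===== SOURCE A (Python) =====
-- def assigned_range(lst: list) -> list:
--     assigned: list = []
--     min: int = 0
--     max: int = 0
--     for i in lst:
--         max = i * 1000
--         assigned.append((round(min), round(max)))
--         min = max
--     return assigned
-- ===== SOURCE B (Python) =====
-- def assigned_range(lst: list) -> list:
--     # Divide and conquer: the ranges of a segment are the ranges of its two
--     # halves, where the right half starts from the last scaled value of the
--     # left half (seg[m-1]*1000); the whole list starts from base 0.
--     def ranges(seg, base):
--         if len(seg) <= 1: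
--             return [(round(base), round(seg[0] * 1000))] if seg else []
--         m = len(seg) // 2
--         return ranges(seg[:m], base) + ranges(seg[m:], seg[m - 1] * 1000)
--     return ranges(lst, 0)
-- ===== Notes on version B (the rewrite author's own statement) =====
-- stated objective: alternative
-- what changed: Replaces A's single sequential pass carrying a mutable running lower bound with a divide-and-conquer recursion: the ranges of a segment are the concatenation of the ranges of its two halves, the right half seeded by the left half's last scaled element.
import Mathlib
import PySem

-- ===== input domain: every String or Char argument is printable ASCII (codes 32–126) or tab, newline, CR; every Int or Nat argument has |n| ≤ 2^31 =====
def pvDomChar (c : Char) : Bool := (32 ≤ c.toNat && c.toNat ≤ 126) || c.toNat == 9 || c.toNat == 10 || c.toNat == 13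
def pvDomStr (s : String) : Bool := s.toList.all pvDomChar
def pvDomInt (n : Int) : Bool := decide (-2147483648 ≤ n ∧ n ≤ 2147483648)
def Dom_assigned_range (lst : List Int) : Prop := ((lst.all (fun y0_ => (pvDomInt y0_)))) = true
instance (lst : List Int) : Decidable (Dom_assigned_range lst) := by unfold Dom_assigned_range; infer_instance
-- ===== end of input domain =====

-- ===== PORT A =====
-- B replaces A's sequential accumulator loop with a divide-and-conquer recursion (objective: alternative).
-- round() on ints is the identity; both ports reflect that directly.
def assignedLoopA (mn : Int) : List Int → List (Int × Int)
  | [] => []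
  | i :: rest => (mn, i * 1000) :: assignedLoopA (i * 1000) rest

def assigned_range (lst : List Int) : List (Int × Int) := assignedLoopA 0 lst

-- ===== PORT B =====
-- ranges(seg, base): halves of the segment, right half seeded by seg[m-1]*1000.
-- seg[m-1] is always in range (1 ≤ m ≤ len seg), ported as getD (m-1) 0.
def rangesB : List Int → Int → List (Int × Int)
  | [], _ => []
  | [x], base => [(base, x * 1000)]
  | a :: b :: t, base =>
    let seg := a :: b :: t
    let m := seg.length / 2
    rangesB (seg.take m) base ++ rangesB (seg.drop m) (seg.getD (m - 1) 0 * 1000)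
termination_by seg _ => seg.length
decreasing_by
  · simp [List.length_take]; omega
  · simp [List.length_drop]; omega

def assigned_range_alt (lst : List Int) : List (Int × Int) := rangesB lst 0

-- ===== PRECONDITION & SPEC =====
def Spec_assigned_range (lst : List Int) (out : List (Int × Int)) : Prop := out = assigned_range_alt lst
instance (lst : List Int) (out : List (Int × Int)) : Decidable (Spec_assigned_range lst out) := by unfold Spec_assigned_range; infer_instance

-- ===== CLAIM (what is proved, stated in full; the proofs are below) =====
def Claim_equal_assigned_range : Prop := ∀ (lst : List Int), Dom_assigned_range lst → Spec_assigned_range lst (assigned_range lst)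

-- ===== LEMMAS AND PROOFS =====

-- lower bound seeding the segment after xs, given xs started at mn
def nextBase (mn : Int) (xs : List Int) : Int :=
  match xs.getLast? with
  | none => mn
  | some x => x * 1000

theorem nextBase_cons (mn a : Int) (t : List Int) :
    nextBase mn (a :: t) = nextBase (a * 1000) t := by
  cases t with
  | nil => simp [nextBase]
  | cons h r =>
    simp only [nextBase, List.getLast?_cons_cons]
    cases hL : (h :: r).getLast? with
    | none => exact absurd hL (by simp)
    | some x => rfl

theorem loopA_append (mn : Int) (xs ys : List Int) :
    assignedLoopA mn (xs ++ ys) = assignedLoopA mn xs ++ assignedLoopA (nextBase mn xs) ys := by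
  induction xs generalizing mn with
  | nil => rfl
  | cons a t ih =>
    simp only [List.cons_append, assignedLoopA, ih (a * 1000), nextBase_cons]

theorem rangesB_eq_loopA (seg : List Int) (base : Int) :
    rangesB seg base = assignedLoopA base seg := by
  induction seg, base using rangesB.induct with
  | case1 base => rw [rangesB]; rfl
  | case2 x base => rw [rangesB]; rfl
  | case3 a b t base seg m ih1 ih2 =>
    rw [rangesB, ih1, ih2]
    have hlen : 2 ≤ (a :: b :: t).length := by simp
    have hm : 1 ≤ (a :: b :: t).length / 2 ∧ (a :: b :: t).length / 2 ≤ (a :: b :: t).length := by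
      omega
    have hidx : (a :: b :: t).length / 2 - 1 < (a :: b :: t).length := by omega
    have hL : ((a :: b :: t).take ((a :: b :: t).length / 2)).getLast?
        = some ((a :: b :: t)[(a :: b :: t).length / 2 - 1]'hidx) := by
      rw [List.getLast?_eq_getElem?, List.length_take,
        show min ((a :: b :: t).length / 2) (a :: b :: t).length - 1
            = (a :: b :: t).length / 2 - 1 from by omega,
        List.getElem?_take_of_lt (by omega), List.getElem?_eq_getElem hidx]
    have hbase : nextBase base ((a :: b :: t).take ((a :: b :: t).length / 2))
        = (a :: b :: t).getD ((a :: b :: t).length / 2 - 1) 0 * 1000 := by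
      unfold nextBase
      rw [hL, List.getD_eq_getElem?_getD, List.getElem?_eq_getElem hidx]
      rfl
    rw [← hbase, ← loopA_append, List.take_append_drop]

-- ===== VERDICT (by name: the statement is the Claim_ definition above) =====
theorem assigned_range_spec : Claim_equal_assigned_range := by
  intro lst _
  unfold Spec_assigned_range assigned_range assigned_range_alt
  exact (rangesB_eq_loopA lst 0).symm
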